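-- pv_equiv track=rewrite | github.com/adrom123/DataMining_Capstone | task4/task4.py | build_dish_star_map
-- ===== SOURCE A (Python) =====
-- def build_dish_star_map(dishes, restaurant_reviews):
-- 	dish_star_map = {}
--
-- 	for dish in dishes:
-- 		dish_star_map[dish] = {}
--
-- 	for dish in dishes:
-- 		for bus_id in restaurant_reviews:
-- 			stars = restaurant_reviews[bus_id]
--
-- 			for star in stars:
-- 				reviews = restaurant_reviews[bus_id][star]
--
-- 				for review in reviews:
-- 					date = review[0]
-- 					content = review[1]
--
-- 					if dish in content:
-- 						if star not in dish_star_map[dish]: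
-- 							dish_star_map[dish][star] = []
--
-- 						dish_star_map[dish][star].append((date))
--
-- 	return dish_star_map
-- ===== SOURCE B (Python) =====
-- def build_dish_star_map(dishes, restaurant_reviews):
-- 	# one pass over the reviews collecting, per distinct dish, the matching
-- 	# (star, date) pairs in traversal order; then assemble the result per dish
-- 	uniq = list(dict.fromkeys(dishes))
--
-- 	hits = {dish: [] for dish in uniq}
-- 	for stars in restaurant_reviews.values():
-- 		for star, reviews in stars.items():
-- 			for date, content in reviews:
-- 				for dish in uniq:
-- 					if dish in content:
-- 						hits[dish].append((star, date))
--
-- 	dish_star_map = {dish: {} for dish in dishes}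
-- 	for dish in dishes:
-- 		inner = dish_star_map[dish]
-- 		for star, date in hits[dish]:
-- 			inner.setdefault(star, []).append(date)
--
-- 	return dish_star_map
-- ===== Notes on version B (the rewrite author's own statement) =====
-- stated objective: faster
-- what changed: B inverts the traversal: one review-outer pass collects, per distinct dish, the matching (star, date) pairs; a second pass assembles the per-dish star dicts from those collected sequences, instead of A's re-traversal of the whole nested review structure once per dish (and once per duplicate dish occurrence).
import Mathlib
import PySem

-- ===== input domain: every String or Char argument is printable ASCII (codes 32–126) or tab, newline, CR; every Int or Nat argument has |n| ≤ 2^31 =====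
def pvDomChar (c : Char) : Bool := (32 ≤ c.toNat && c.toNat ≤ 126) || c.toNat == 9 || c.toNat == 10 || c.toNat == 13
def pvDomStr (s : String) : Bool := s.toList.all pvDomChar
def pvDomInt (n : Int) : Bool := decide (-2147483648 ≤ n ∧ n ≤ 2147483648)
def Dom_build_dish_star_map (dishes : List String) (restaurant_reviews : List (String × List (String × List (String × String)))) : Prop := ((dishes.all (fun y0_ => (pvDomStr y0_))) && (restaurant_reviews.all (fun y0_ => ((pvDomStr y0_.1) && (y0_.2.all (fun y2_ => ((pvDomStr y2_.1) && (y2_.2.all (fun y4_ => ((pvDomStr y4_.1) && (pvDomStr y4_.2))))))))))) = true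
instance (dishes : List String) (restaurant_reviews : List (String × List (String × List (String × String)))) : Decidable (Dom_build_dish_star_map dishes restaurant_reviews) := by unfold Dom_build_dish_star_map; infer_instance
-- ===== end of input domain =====

-- B replaces A's dish-outer re-traversal of the nested review dicts by a single review-outer
-- collection pass over the distinct dishes plus an assembly pass (objective: alternative).

-- ===== PORT A =====
-- A iterates 'for bus_id in restaurant_reviews' / 'for star in stars' over dicts and looks the
-- values up again; ported as folds over the association-list pairs, exact since a Python dict
-- has unique keys so 'restaurant_reviews[bus_id]' is the pair's own value.
def build_dish_star_map (dishes : List String) (restaurant_reviews : List (String × List (String × List (String × String)))) : List (String × List (String × List String)) :=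
  -- for dish in dishes: dish_star_map[dish] = {}
  let m0 : PySem.Dict String (PySem.Dict String (List String)) :=
    dishes.foldl (fun m dish => m.insert dish PySem.Dict.empty) PySem.Dict.empty
  let m :=
    dishes.foldl (fun m dish =>
      restaurant_reviews.foldl (fun m b =>          -- b = (bus_id, stars)
        b.2.foldl (fun m s =>                       -- s = (star, reviews)
          s.2.foldl (fun m r =>                     -- r = (date, content)
            if PySem.Str.isIn dish r.2 then
              m.modify dish PySem.Dict.empty (fun inner =>
                -- if star not in dish_star_map[dish]: dish_star_map[dish][star] = []
                let inner := if inner.contains s.1 then inner else inner.insert s.1 []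
                -- dish_star_map[dish][star].append(date)
                inner.modify s.1 [] (fun l => l ++ [r.1]))
            else m) m) m) m) m0
  m.items.map (fun p => (p.1, p.2.items))

-- ===== PORT B =====
def build_dish_star_map_alt (dishes : List String) (restaurant_reviews : List (String × List (String × List (String × String)))) : List (String × List (String × List String)) :=
  -- uniq = list(dict.fromkeys(dishes))
  let uniq := PySem.List.dedup dishes
  -- hits = {dish: [] for dish in uniq}
  let hits0 : PySem.Dict String (List (String × String)) :=
    uniq.foldl (fun h dish => h.insert dish []) PySem.Dict.empty
  let hits :=
    restaurant_reviews.foldl (fun h b =>            -- for stars in restaurant_reviews.values()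
      b.2.foldl (fun h s =>                         -- for star, reviews in stars.items()
        s.2.foldl (fun h r =>                       -- for date, content in reviews
          uniq.foldl (fun h dish =>                 -- for dish in uniq
            if PySem.Str.isIn dish r.2 then
              -- hits[dish].append((star, date)); the key is present since dish ∈ uniq
              h.modify dish [] (fun l => l ++ [(s.1, r.1)])
            else h) h) h) h) hits0
  -- dish_star_map = {dish: {} for dish in dishes}
  let m0 : PySem.Dict String (PySem.Dict String (List String)) :=
    dishes.foldl (fun m dish => m.insert dish PySem.Dict.empty) PySem.Dict.empty
  let m :=
    dishes.foldl (fun m dish =>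
      -- inner = dish_star_map[dish] (mutated in place, hence modify at dish)
      m.modify dish PySem.Dict.empty (fun inner =>
        -- for star, date in hits[dish]: inner.setdefault(star, []).append(date)
        (hits.getD dish []).foldl (fun inner p =>
          (inner.setdefault p.1 []).modify p.1 [] (fun l => l ++ [p.2])) inner)) m0
  m.items.map (fun p => (p.1, p.2.items))

-- ===== PRECONDITION & SPEC =====
def Spec_build_dish_star_map (dishes : List String) (restaurant_reviews : List (String × List (String × List (String × String)))) (out : List (String × List (String × List String))) : Prop := out = build_dish_star_map_alt dishes restaurant_reviews
instance (dishes : List String) (restaurant_reviews : List (String × List (String × List (String × String)))) (out : List (String × List (String × List String))) : Decidable (Spec_build_dish_star_map dishes restaurant_reviews out) := by unfold Spec_build_dish_star_map; infer_instance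

-- ===== CLAIM (what is proved, stated in full; the proofs are below) =====
def Claim_equal_build_dish_star_map : Prop := ∀ (dishes : List String) (restaurant_reviews : List (String × List (String × List (String × String)))), Dom_build_dish_star_map dishes restaurant_reviews → Spec_build_dish_star_map dishes restaurant_reviews (build_dish_star_map dishes restaurant_reviews)

-- ===== LEMMAS AND PROOFS =====

-- the stream of (star, date, content) events in traversal order
def pvEvents (restaurant_reviews : List (String × List (String × List (String × String)))) : List (String × String × String) :=
  restaurant_reviews.flatMap (fun b => b.2.flatMap (fun s => s.2.map (fun r => (s.1, r.1, r.2))))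

-- A's inner-dict update for one matching event
def pvUpd (star date : String) (inner : PySem.Dict String (List String)) : PySem.Dict String (List String) :=
  (if inner.contains star then inner else inner.insert star []).modify star [] (fun l => l ++ [date])

-- one pass of A over the event stream for one dish
def pvG (dish : String) (evs : List (String × String × String)) (inner : PySem.Dict String (List String)) : PySem.Dict String (List String) :=
  evs.foldl (fun inner e => if PySem.Str.isIn dish e.2.2 then pvUpd e.1 e.2.1 inner else inner) inner

lemma pvG_cons (dish : String) (e : String × String × String) (t : List (String × String × String)) (v : PySem.Dict String (List String)) :
    pvG dish (e :: t) v = pvG dish t (if PySem.Str.isIn dish e.2.2 then pvUpd e.1 e.2.1 v else v) := rfl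

-- the matched (star, date) pairs of one dish, in traversal order
def pvSeq (dish : String) (evs : List (String × String × String)) : List (String × String) :=
  (evs.filter (fun e => PySem.Str.isIn dish e.2.2)).map (fun e => (e.1, e.2.1))

lemma pv_setdefault_eq (inner : PySem.Dict String (List String)) (star : String) :
    inner.setdefault star [] = if inner.contains star then inner else inner.insert star [] := by
  by_cases h : inner.contains star = true
  · rw [PySem.Dict.setdefault_of_contains inner _ h, if_pos h]
  · simp only [Bool.not_eq_true] at h
    rw [PySem.Dict.setdefault_of_not_contains inner _ h, if_neg (by simp [h])]

-- replaying one dish's matched pairs is one pass of A over the events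
lemma pv_seq_fold (dish : String) (evs : List (String × String × String)) (inner : PySem.Dict String (List String)) :
    (pvSeq dish evs).foldl (fun inner p => pvUpd p.1 p.2 inner) inner = pvG dish evs inner := by
  rw [pvSeq, pvG, List.foldl_map, List.foldl_filter]

lemma pv_modify_keys {ν : Type} (m : PySem.Dict String ν) (k : String) (d0 : ν) (f : ν → ν)
    (h : m.contains k = true) : (m.modify k d0 f).keys = m.keys := by
  rw [PySem.Dict.keys_modify, PySem.Dict.keys_insert_of_contains m _ h]

-- A's per-dish triple fold is the event fold
lemma pv_A_flatten (dish : String) (restaurant_reviews : List (String × List (String × List (String × String)))) (m : PySem.Dict String (PySem.Dict String (List String))) :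
    restaurant_reviews.foldl (fun m b =>
        b.2.foldl (fun m s =>
          s.2.foldl (fun m r =>
            if PySem.Str.isIn dish r.2 then
              m.modify dish PySem.Dict.empty (fun inner =>
                let inner := if inner.contains s.1 then inner else inner.insert s.1 []
                inner.modify s.1 [] (fun l => l ++ [r.1]))
            else m) m) m) m
      = (pvEvents restaurant_reviews).foldl (fun m e =>
          if PySem.Str.isIn dish e.2.2 then m.modify dish PySem.Dict.empty (pvUpd e.1 e.2.1) else m) m := by
  simp only [pvEvents, List.foldl_flatMap, List.foldl_map]; rfl

-- B's collection triple fold is the event fold of the inner uniq loop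
lemma pv_B_flatten (uniq : List String) (restaurant_reviews : List (String × List (String × List (String × String)))) (h : PySem.Dict String (List (String × String))) :
    restaurant_reviews.foldl (fun h b =>
        b.2.foldl (fun h s =>
          s.2.foldl (fun h r =>
            uniq.foldl (fun h dish =>
              if PySem.Str.isIn dish r.2 then
                h.modify dish [] (fun l => l ++ [(s.1, r.1)])
              else h) h) h) h) h
      = (pvEvents restaurant_reviews).foldl (fun h e =>
          uniq.foldl (fun h dish =>
            if PySem.Str.isIn dish e.2.2 then h.modify dish [] (fun l => l ++ [(e.1, e.2.1)]) else h) h) h := by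
  simp only [pvEvents, List.foldl_flatMap, List.foldl_map]

-- pointwise value of an event fold that only ever modifies the key k (A's pass for one dish)
lemma pv_single_key_getD (k x : String) (evs : List (String × String × String)) (m : PySem.Dict String (PySem.Dict String (List String))) :
    ((evs.foldl (fun m e => if PySem.Str.isIn k e.2.2 then m.modify k PySem.Dict.empty (pvUpd e.1 e.2.1) else m) m).getD x PySem.Dict.empty)
      = if x = k then pvG k evs (m.getD k PySem.Dict.empty) else m.getD x PySem.Dict.empty := by
  induction evs generalizing m with
  | nil => by_cases hxk : x = k <;> simp [pvG, hxk]
  | cons e t ih =>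
    simp only [List.foldl_cons]
    by_cases hm : PySem.Str.isIn k e.2.2 = true
    · rw [if_pos hm, ih, pvG_cons, if_pos hm]
      by_cases hxk : x = k
      · subst hxk
        rw [if_pos rfl, if_pos rfl, PySem.Dict.getD_modify, if_pos rfl]
      · rw [if_neg hxk, if_neg hxk, PySem.Dict.getD_modify, if_neg hxk]
    · rw [if_neg hm, ih, pvG_cons, if_neg hm]

-- keys are unchanged by an event fold that only modifies a contained key
lemma pv_single_key_keys (k : String) (evs : List (String × String × String)) (m : PySem.Dict String (PySem.Dict String (List String)))
    (hk : k ∈ m.keys) :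
    (evs.foldl (fun m e => if PySem.Str.isIn k e.2.2 then m.modify k PySem.Dict.empty (pvUpd e.1 e.2.1) else m) m).keys = m.keys := by
  induction evs generalizing m with
  | nil => rfl
  | cons e t ih =>
    simp only [List.foldl_cons]
    by_cases hm : PySem.Str.isIn k e.2.2 = true
    · have hc : m.contains k = true := (PySem.Dict.contains_iff_mem_keys m k).mpr hk
      have hkeys := pv_modify_keys m k PySem.Dict.empty (pvUpd e.1 e.2.1) hc
      rw [if_pos hm, ih _ (by rw [hkeys]; exact hk), hkeys]
    · rw [if_neg hm]; exact ih m hk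

-- pointwise value of the collection loop over the (duplicate-free) distinct dishes, one event
lemma pv_scan_inner_getD {ν : Type} (names : List String) (hnd : names.Nodup) (c : String → Bool) (u : ν → ν) (dflt : ν) (x : String)
    (m : PySem.Dict String ν) :
    ((names.foldl (fun m n => if c n then m.modify n dflt u else m) m).getD x dflt)
      = if x ∈ names ∧ c x = true then u (m.getD x dflt) else m.getD x dflt := by
  induction names generalizing m with
  | nil => simp
  | cons d t ih =>
    have hnd' : t.Nodup := hnd.of_cons
    have hdt : d ∉ t := (List.nodup_cons.mp hnd).1
    simp only [List.foldl_cons]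
    by_cases hm : c d = true
    · rw [if_pos hm, ih hnd']
      by_cases hx : x = d
      · subst hx
        rw [if_neg (by simp [hdt]), PySem.Dict.getD_modify, if_pos rfl,
          if_pos ⟨List.mem_cons_self, hm⟩]
      · rw [PySem.Dict.getD_modify, if_neg hx]
        by_cases hc : x ∈ t ∧ c x = true
        · rw [if_pos hc, if_pos ⟨List.mem_cons_of_mem _ hc.1, hc.2⟩]
        · rw [if_neg hc, if_neg (fun h => hc ⟨(List.mem_cons.mp h.1).resolve_left hx, h.2⟩)]
    · rw [if_neg hm, ih hnd']
      by_cases hx : x = d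
      · subst hx
        rw [if_neg (by simp [hdt]), if_neg (fun h => hm h.2)]
      · by_cases hc : x ∈ t ∧ c x = true
        · rw [if_pos hc, if_pos ⟨List.mem_cons_of_mem _ hc.1, hc.2⟩]
        · rw [if_neg hc, if_neg (fun h => hc ⟨(List.mem_cons.mp h.1).resolve_left hx, h.2⟩)]

-- pointwise value of B's whole collection fold over the events
lemma pv_scan_getD {ν : Type} (names : List String) (hnd : names.Nodup) (evs : List (String × String × String))
    (u : (String × String × String) → ν → ν) (dflt : ν) (x : String) (hx : x ∈ names)
    (m : PySem.Dict String ν) :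
    ((evs.foldl (fun m e => names.foldl (fun m n => if PySem.Str.isIn n e.2.2 then m.modify n dflt (u e) else m) m) m).getD x dflt)
      = evs.foldl (fun v e => if PySem.Str.isIn x e.2.2 then u e v else v) (m.getD x dflt) := by
  induction evs generalizing m with
  | nil => rfl
  | cons e t ih =>
    simp only [List.foldl_cons]
    rw [ih, pv_scan_inner_getD names hnd (fun n => PySem.Str.isIn n e.2.2) (u e) dflt x m]
    by_cases hm : PySem.Str.isIn x e.2.2 = true
    · rw [if_pos ⟨hx, hm⟩, if_pos hm]
    · rw [if_neg (fun h => hm h.2), if_neg hm]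

-- pointwise value of the initialising comprehension {n: v0 for n in names}
lemma pv_init_getD {ν : Type} (names : List String) (v0 dflt : ν) (x : String) (m : PySem.Dict String ν) :
    ((names.foldl (fun m n => m.insert n v0) m).getD x dflt)
      = if x ∈ names then v0 else m.getD x dflt := by
  induction names generalizing m with
  | nil => simp
  | cons d t ih =>
    simp only [List.foldl_cons]
    rw [ih]
    by_cases hx : x ∈ t
    · rw [if_pos hx, if_pos (List.mem_cons_of_mem _ hx)]
    · rw [if_neg hx, PySem.Dict.getD_insert]
      by_cases hxd : x = d
      · rw [if_pos hxd, if_pos (by simp [hxd])]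
      · rw [if_neg hxd, if_neg (by simp [hxd, hx])]

-- pointwise value of A's whole dishes fold: one pass of pvG per occurrence of x
lemma pv_A_occ (dishes : List String) (evs : List (String × String × String)) (x : String)
    (m : PySem.Dict String (PySem.Dict String (List String))) :
    ((dishes.foldl (fun m dish => evs.foldl (fun m e => if PySem.Str.isIn dish e.2.2 then m.modify dish PySem.Dict.empty (pvUpd e.1 e.2.1) else m) m) m).getD x PySem.Dict.empty)
      = dishes.foldl (fun v dish => if dish = x then pvG x evs v else v) (m.getD x PySem.Dict.empty) := by
  induction dishes generalizing m with
  | nil => rfl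
  | cons d t ih =>
    simp only [List.foldl_cons]
    rw [ih, pv_single_key_getD d x evs m]
    by_cases hxd : d = x
    · subst hxd
      rw [if_pos rfl]
    · rw [if_neg (fun h => hxd h.symm), if_neg hxd]

-- keys are unchanged by A's whole dishes fold
lemma pv_A_keys (dishes : List String) (evs : List (String × String × String))
    (m : PySem.Dict String (PySem.Dict String (List String))) (h : ∀ d ∈ dishes, d ∈ m.keys) :
    (dishes.foldl (fun m dish => evs.foldl (fun m e => if PySem.Str.isIn dish e.2.2 then m.modify dish PySem.Dict.empty (pvUpd e.1 e.2.1) else m) m) m).keys = m.keys := by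
  induction dishes generalizing m with
  | nil => rfl
  | cons d t ih =>
    simp only [List.foldl_cons]
    have hkeys := pv_single_key_keys d evs m (h d (by simp))
    rw [ih _ (fun d' hd' => by rw [hkeys]; exact h d' (by simp [hd'])), hkeys]

-- pointwise value of B's assembly fold: one replay of hits[x] per occurrence of x
lemma pv_B_occ (dishes : List String) (hits : PySem.Dict String (List (String × String))) (x : String)
    (m : PySem.Dict String (PySem.Dict String (List String))) :
    ((dishes.foldl (fun m dish => m.modify dish PySem.Dict.empty (fun inner =>
        (hits.getD dish []).foldl (fun inner p =>
          (inner.setdefault p.1 []).modify p.1 [] (fun l => l ++ [p.2])) inner)) m).getD x PySem.Dict.empty)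
      = dishes.foldl (fun v dish => if dish = x then
          (hits.getD x []).foldl (fun inner p =>
            (inner.setdefault p.1 []).modify p.1 [] (fun l => l ++ [p.2])) v
        else v) (m.getD x PySem.Dict.empty) := by
  induction dishes generalizing m with
  | nil => rfl
  | cons d t ih =>
    simp only [List.foldl_cons]
    rw [ih, PySem.Dict.getD_modify]
    by_cases hxd : d = x
    · subst hxd
      rw [if_pos rfl]
    · rw [if_neg (fun h : x = d => hxd h.symm), if_neg hxd]

-- keys are unchanged by B's assembly fold when every dish is a key
lemma pv_B_keys (dishes : List String) (hits : PySem.Dict String (List (String × String)))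
    (m : PySem.Dict String (PySem.Dict String (List String))) (h : ∀ d ∈ dishes, d ∈ m.keys) :
    (dishes.foldl (fun m dish => m.modify dish PySem.Dict.empty (fun inner =>
        (hits.getD dish []).foldl (fun inner p =>
          (inner.setdefault p.1 []).modify p.1 [] (fun l => l ++ [p.2])) inner)) m).keys = m.keys := by
  induction dishes generalizing m with
  | nil => rfl
  | cons d t ih =>
    simp only [List.foldl_cons]
    have hc : m.contains d = true := (PySem.Dict.contains_iff_mem_keys m d).mpr (h d (by simp))
    have hkeys := pv_modify_keys m d PySem.Dict.empty (fun inner =>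
        (hits.getD d []).foldl (fun inner p =>
          (inner.setdefault p.1 []).modify p.1 [] (fun l => l ++ [p.2])) inner) hc
    rw [ih _ (fun d' hd' => by rw [hkeys]; exact h d' (by simp [hd'])), hkeys]

-- keys of the initialising comprehension
lemma pv_init_keys {ν : Type} (names : List String) (v0 : ν) :
    ((names.foldl (fun m n => m.insert n v0) (PySem.Dict.empty : PySem.Dict String ν))).keys = PySem.List.dedup names := by
  rw [PySem.Dict.keys_foldl_insert names (fun _ _ => v0) PySem.Dict.empty, PySem.Dict.keys_empty]
  exact PySem.Set.update_empty names

-- ===== VERDICT (by name: the statement is the Claim_ definition above) =====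
theorem build_dish_star_map_spec : Claim_equal_build_dish_star_map := by
  intro dishes rr _
  unfold Spec_build_dish_star_map
  simp only [build_dish_star_map, build_dish_star_map_alt]
  set uniq := PySem.List.dedup dishes with huniq
  have hund : uniq.Nodup := PySem.Set.nodup_ofList dishes
  have humem : ∀ x, x ∈ uniq ↔ x ∈ dishes := fun x => PySem.Set.mem_ofList dishes x
  set evs := pvEvents rr with hevs
  set m0 : PySem.Dict String (PySem.Dict String (List String)) :=
    dishes.foldl (fun m dish => m.insert dish PySem.Dict.empty) PySem.Dict.empty with hm0
  set hits0 : PySem.Dict String (List (String × String)) :=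
    uniq.foldl (fun h dish => h.insert dish []) PySem.Dict.empty with hhits0
  have h0keys : m0.keys = uniq := pv_init_keys dishes PySem.Dict.empty
  have h0getD : ∀ x, m0.getD x PySem.Dict.empty = PySem.Dict.empty := by
    intro x
    rw [hm0, pv_init_getD]
    by_cases hx : x ∈ dishes
    · rw [if_pos hx]
    · rw [if_neg hx, PySem.Dict.getD_empty]
  -- the collected hits dict: per distinct dish, the matched (star, date) pairs
  have hhits : ∀ (x : String), x ∈ dishes →
      ((evs.foldl (fun h e => uniq.foldl (fun h dish =>
          if PySem.Str.isIn dish e.2.2 then h.modify dish [] (fun l => l ++ [(e.1, e.2.1)]) else h) h) hits0).getD x [])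
        = pvSeq x evs := by
    intro x hx
    rw [pv_scan_getD uniq hund evs (fun e l => l ++ [(e.1, e.2.1)]) [] x ((humem x).mpr hx) hits0]
    have : hits0.getD x [] = [] := by
      rw [hhits0, pv_init_getD]
      by_cases h : x ∈ uniq
      · rw [if_pos h]
      · rw [if_neg h, PySem.Dict.getD_empty]
    rw [this, pvSeq, PySem.List.foldl_append_if (fun e => PySem.Str.isIn x e.2.2) (fun e => (e.1, e.2.1)) evs [],
      List.nil_append]
  -- rewrite A's fold into event form
  have hAeq : (dishes.foldl (fun m dish =>
      rr.foldl (fun m b => b.2.foldl (fun m s => s.2.foldl (fun m r =>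
        if PySem.Str.isIn dish r.2 then
          m.modify dish PySem.Dict.empty (fun inner =>
            let inner := if inner.contains s.1 then inner else inner.insert s.1 []
            inner.modify s.1 [] (fun l => l ++ [r.1]))
        else m) m) m) m) m0)
      = dishes.foldl (fun m dish => evs.foldl (fun m e =>
          if PySem.Str.isIn dish e.2.2 then m.modify dish PySem.Dict.empty (pvUpd e.1 e.2.1) else m) m) m0 :=
    congrArg (fun f => dishes.foldl f m0)
      (funext fun m => funext fun dish => pv_A_flatten dish rr m)
  rw [hAeq, pv_B_flatten uniq rr hits0]
  set hits := evs.foldl (fun h e => uniq.foldl (fun h dish =>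
      if PySem.Str.isIn dish e.2.2 then h.modify dish [] (fun l => l ++ [(e.1, e.2.1)]) else h) h) hits0 with hhitsdef
  set MA := dishes.foldl (fun m dish => evs.foldl (fun m e =>
      if PySem.Str.isIn dish e.2.2 then m.modify dish PySem.Dict.empty (pvUpd e.1 e.2.1) else m) m) m0 with hMA
  set MB := dishes.foldl (fun m dish => m.modify dish PySem.Dict.empty (fun inner =>
      (hits.getD dish []).foldl (fun inner p =>
        (inner.setdefault p.1 []).modify p.1 [] (fun l => l ++ [p.2])) inner)) m0 with hMB
  have hdin : ∀ d ∈ dishes, d ∈ m0.keys := fun d hd => by rw [h0keys]; exact (humem d).mpr hd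
  have hAkeys : MA.keys = uniq := by rw [hMA, pv_A_keys dishes evs m0 hdin, h0keys]
  have hBkeys : MB.keys = uniq := by rw [hMB, pv_B_keys dishes hits m0 hdin, h0keys]
  have hgetD : ∀ x ∈ uniq, MA.getD x PySem.Dict.empty = MB.getD x PySem.Dict.empty := by
    intro x hxu
    have hx : x ∈ dishes := (humem x).mp hxu
    rw [hMA, hMB, pv_A_occ dishes evs x m0, pv_B_occ dishes hits x m0]
    have hfun : (fun (v : PySem.Dict String (List String)) dish => if dish = x then pvG x evs v else v)
        = (fun v dish => if dish = x then
            (hits.getD x []).foldl (fun inner p =>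
              (inner.setdefault p.1 []).modify p.1 [] (fun l => l ++ [p.2])) v
          else v) := by
      funext v dish
      by_cases hd : dish = x
      · rw [if_pos hd, if_pos hd, hhits x hx]
        rw [show (fun (inner : PySem.Dict String (List String)) (p : String × String) =>
            (inner.setdefault p.1 []).modify p.1 [] (fun l => l ++ [p.2]))
          = (fun inner p => pvUpd p.1 p.2 inner) from funext fun inner => funext fun p => by
            rw [pvUpd, pv_setdefault_eq]]
        exact (pv_seq_fold x evs v).symm
      · rw [if_neg hd, if_neg hd]
    rw [hfun]
  have hitems : MA.items = MB.items := by
    rw [PySem.Dict.items_eq_map_keys MA (by rw [hAkeys]; exact hund) PySem.Dict.empty,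
        PySem.Dict.items_eq_map_keys MB (by rw [hBkeys]; exact hund) PySem.Dict.empty,
        hAkeys, hBkeys]
    exact List.map_congr_left (fun x hxu => by rw [hgetD x hxu])
  rw [hitems]
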